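-- pv_equiv track=rewrite | github.com/SauravSinha76/scaler | class7/all_sub_array.py | solve
-- ===== SOURCE A (Python) =====
-- def solve(A):
--     n = len(A)
--     res =[]
--     for i in range(n):
--         for j in range(i,n):
--             sub =[]
--             for k in range(i,j+1):
--                 sub.append(A[k])
--             res.append(sub)
--     return res
-- ===== SOURCE B (Python) =====
-- def solve(A):
--     # Right-to-left reuse: 'prev' is the block of subarrays starting at the
--     # current index — [x] plus x prepended to every subarray of the previous
--     # block (the prefixes of the next suffix).  The answer is the blocks in
--     # left-to-right start order; no index arithmetic, nothing rebuilt.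
--     blocks = []
--     prev = []
--     for x in reversed(A):
--         prev = [[x]] + [[x] + p for p in prev]
--         blocks.append(prev)
--     res = []
--     for b in reversed(blocks):
--         res.extend(b)
--     return res
-- ===== Notes on version B (the rewrite author's own statement) =====
-- stated objective: alternative
-- what changed: Replaces the triple-nested index loops with a right-to-left pass that derives each start-index block from the previous one by prepending the new element (recursive reuse of already-built subarrays) and concatenates the blocks once; no index arithmetic and no per-subarray rebuild loop.
import Mathlib
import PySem

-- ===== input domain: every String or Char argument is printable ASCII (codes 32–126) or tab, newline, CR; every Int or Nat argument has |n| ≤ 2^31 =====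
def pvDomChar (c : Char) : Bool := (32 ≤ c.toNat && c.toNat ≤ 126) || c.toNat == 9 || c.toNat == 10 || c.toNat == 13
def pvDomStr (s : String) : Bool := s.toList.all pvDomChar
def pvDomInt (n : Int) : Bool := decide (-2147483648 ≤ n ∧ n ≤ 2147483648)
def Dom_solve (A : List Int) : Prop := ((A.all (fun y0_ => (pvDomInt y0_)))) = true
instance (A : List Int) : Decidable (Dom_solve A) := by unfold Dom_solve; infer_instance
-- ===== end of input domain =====

-- B builds the blocks right-to-left, each block reusing the previous one
-- (objective: alternative — same output by structural reuse, no index loops).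

-- ===== PORT A =====
-- the triple-nested loop, step for step: i over range(n), j over range(i,n),
-- k over range(i,j+1) appending A[k]
def solve (A : List Int) : List (List Int) :=
  let n : Int := A.length
  (PySem.List.pyRange 0 n 1).foldl (fun res i =>
    (PySem.List.pyRange i n 1).foldl (fun res j =>
      res ++ [(PySem.List.pyRange i (j + 1) 1).foldl
                (fun sub k => sub ++ [PySem.List.pyGetD A k 0]) []]) res) []

-- ===== PORT B =====
-- the 'for x in reversed(A)' loop: state is (blocks, prev);
-- prev = [[x]] + [[x] + p for p in prev], blocks.append(prev)
def solve_alt (A : List Int) : List (List Int) :=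
  let st : List (List (List Int)) × List (List Int) :=
    A.reverse.foldl (fun st x =>
      let prev := [x] :: st.2.map (fun p => x :: p)
      (st.1 ++ [prev], prev)) ([], [])
  -- the 'for b in reversed(blocks): res.extend(b)' loop
  st.1.reverse.foldl (fun res b => res ++ b) []

-- ===== PRECONDITION & SPEC =====
def Spec_solve (A : List Int) (out : List (List Int)) : Prop := out = solve_alt A
instance (A : List Int) (out : List (List Int)) : Decidable (Spec_solve A out) := by unfold Spec_solve; infer_instance

-- ===== CLAIM (what is proved, stated in full; the proofs are below) =====
def Claim_equal_solve : Prop := ∀ (A : List Int), Dom_solve A → Spec_solve A (solve A)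

-- ===== LEMMAS AND PROOFS =====

-- nonempty prefixes of xs, by length 1..len
def prefixesNE (xs : List Int) : List (List Int) :=
  (List.range xs.length).map (fun j => xs.take (j + 1))

lemma prefixesNE_cons (x : Int) (xs : List Int) :
    prefixesNE (x :: xs) = [x] :: (prefixesNE xs).map (fun p => x :: p) := by
  unfold prefixesNE
  rw [List.length_cons, List.range_succ_eq_map, List.map_cons, List.map_map, List.map_map]
  simp

lemma map_range_getD (A : List Int) : ∀ (i m : Nat), i + m ≤ A.length →
    (List.range m).map (fun k => A.getD (i + k) 0) = (A.drop i).take m := by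
  intro i m
  induction m generalizing i with
  | zero => intro _; simp
  | succ m ih =>
      intro h
      have hi : i < A.length := by omega
      rw [List.range_succ_eq_map, List.map_cons, List.map_map]
      have hd : A.drop i = A[i] :: A.drop (i + 1) := List.drop_eq_getElem_cons hi
      rw [hd]
      simp only [List.take_succ_cons]
      congr 1
      · simp [hi]
      · rw [← ih (i + 1) (by omega)]
        apply List.map_congr_left
        intro k _
        simp only [Function.comp_apply]
        congr 1
        omega

-- the innermost k-loop of A produces exactly the slice A[i..j]
lemma inner_eq (A : List Int) (i t : Nat) (h : i + t < A.length) :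
    (PySem.List.pyRange (i : Int) ((i : Int) + t + 1) 1).foldl
        (fun sub k => sub ++ [PySem.List.pyGetD A k 0]) []
      = (A.drop i).take (t + 1) := by
  rw [PySem.List.foldl_append_singleton_eq_map, PySem.List.pyRange_one]
  have h1 : (((i : Int) + t + 1) - i).toNat = t + 1 := by omega
  rw [h1, List.map_map]
  rw [← map_range_getD A i (t + 1) (by omega)]
  apply List.map_congr_left
  intro k _
  simp only [Function.comp_apply]
  have : ((i : Int) + k) = ((i + k : Nat) : Int) := by omega
  rw [this, PySem.List.pyGetD_natCast]

-- the middle j-loop of A produces prefixesNE (A.drop i)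
lemma block_eq (A : List Int) (i : Nat) (hi : i ≤ A.length) :
    (PySem.List.pyRange (i : Int) (A.length : Int) 1).map (fun j =>
        (PySem.List.pyRange (i : Int) (j + 1) 1).foldl
          (fun sub k => sub ++ [PySem.List.pyGetD A k 0]) [])
      = prefixesNE (A.drop i) := by
  rw [PySem.List.pyRange_one]
  have h1 : ((A.length : Int) - i).toNat = A.length - i := by omega
  rw [h1, List.map_map]
  unfold prefixesNE
  rw [List.length_drop]
  apply List.map_congr_left
  intro t ht
  rw [List.mem_range] at ht
  simp only [Function.comp_apply]
  rw [show (i : Int) + t = (i : Int) + (t : Int) from rfl]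
  exact inner_eq A i t (by omega)

lemma solve_eq (A : List Int) :
    solve A = (List.range A.length).flatMap (fun i => prefixesNE (A.drop i)) := by
  unfold solve
  simp only []
  have houter : ∀ (l : List Int) (init : List (List Int)),
      l.foldl (fun res i =>
        (PySem.List.pyRange i (A.length : Int) 1).foldl (fun res j =>
          res ++ [(PySem.List.pyRange i (j + 1) 1).foldl
            (fun sub k => sub ++ [PySem.List.pyGetD A k 0]) []]) res) init
      = init ++ l.flatMap (fun i =>
          (PySem.List.pyRange i (A.length : Int) 1).map (fun j =>
            (PySem.List.pyRange i (j + 1) 1).foldl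
              (fun sub k => sub ++ [PySem.List.pyGetD A k 0]) [])) := by
    intro l
    induction l with
    | nil => intro init; simp
    | cons a l ih =>
        intro init
        rw [List.foldl_cons, ih, List.flatMap_cons,
          PySem.List.foldl_append_singleton_eq_map, List.append_assoc]
  rw [houter, List.nil_append, PySem.List.pyRange_one]
  have h0 : ((A.length : Int) - 0).toNat = A.length := by omega
  rw [h0, List.flatMap_map]
  apply List.flatMap_congr
  intro i hi
  rw [List.mem_range] at hi
  simp only [Int.zero_add]
  exact block_eq A i (by omega)

-- the B fold: after processing ys (left to right) from prev = prefixesNE z,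
-- prev is prefixesNE (ys.reverse ++ z) and blocks got one entry per element
lemma foldB (ys : List Int) : ∀ (z : List Int) (bs : List (List (List Int))),
    ys.foldl (fun st x =>
        let prev := [x] :: st.2.map (fun p => x :: p)
        (st.1 ++ [prev], prev)) (bs, prefixesNE z)
      = (bs ++ (List.range ys.length).map
            (fun k => prefixesNE ((ys.take (k + 1)).reverse ++ z)),
         prefixesNE (ys.reverse ++ z)) := by
  induction ys with
  | nil => intro z bs; simp
  | cons y t ih =>
      intro z bs
      rw [List.foldl_cons]
      have hstep : ([y] :: (prefixesNE z).map (fun p => y :: p)) = prefixesNE (y :: z) :=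
        (prefixesNE_cons y z).symm
      simp only [hstep]
      rw [ih (y :: z) (bs ++ [prefixesNE (y :: z)])]
      rw [Prod.mk.injEq]
      constructor
      · rw [List.length_cons, List.range_succ_eq_map, List.map_cons, List.map_map,
          List.append_assoc]
        rw [List.singleton_append]
        apply congrArg
        rw [List.cons_eq_cons]
        refine ⟨rfl, ?_⟩
        apply List.map_congr_left
        intro j _
        simp [List.append_assoc]
      · simp

lemma foldl_append_flatten (l : List (List (List Int))) :
    ∀ init : List (List Int), l.foldl (fun res b => res ++ b) init = init ++ l.flatten := by
  induction l with
  | nil => intro init; simp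
  | cons b l ih => intro init; rw [List.foldl_cons, ih, List.flatten_cons, List.append_assoc]

lemma rev_map_range {α : Type} (n : Nat) (f : Nat → α) :
    ((List.range n).map f).reverse = (List.range n).map (fun k => f (n - 1 - k)) := by
  apply List.ext_getElem
  · simp
  · intro i h1 h2
    simp only [List.getElem_reverse, List.getElem_map, List.getElem_range,
      List.length_map, List.length_range] at *

lemma solve_alt_eq (A : List Int) :
    solve_alt A = (List.range A.length).flatMap (fun i => prefixesNE (A.drop i)) := by
  unfold solve_alt
  have h0 : (([] : List (List (List Int)))    , ([] : List (List Int)))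
      = (([] : List (List (List Int))), prefixesNE []) := by simp [prefixesNE]
  rw [h0, foldB A.reverse [] []]
  simp only [List.nil_append, List.length_reverse]
  rw [rev_map_range, foldl_append_flatten, List.nil_append, List.flatMap]
  congr 1
  apply List.map_congr_left
  intro k hk
  rw [List.mem_range] at hk
  rw [List.append_nil]
  have h1 : A.reverse.take (A.length - 1 - k + 1) = (A.drop (A.length - (A.length - 1 - k + 1))).reverse :=
    List.take_reverse
  have h2 : A.length - (A.length - 1 - k + 1) = k := by omega
  rw [h1, List.reverse_reverse, h2]

-- ===== VERDICT (by name: the statement is the Claim_ definition above) =====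
theorem solve_spec : Claim_equal_solve := by
  intro A _
  unfold Spec_solve
  rw [solve_eq, solve_alt_eq]
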